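-- pv_equiv track=rewrite | github.com/Integritylanddevelopment/GrandPrixSocial | memory/a_memory_core/tag_intelligence_engine/tag_intelligence_engine.py | extract_context_patterns
-- ===== SOURCE A (Python) =====
-- from typing import Dict, List, Tuple, Any, Optional
--
-- def extract_context_patterns(content: str) -> List[str]:
--     patterns = []
--     lines = content.lower().split('\n')
--
--     for line in lines[:20]:
--         if any(keyword in line for keyword in ['error', 'exception', 'traceback']):
--             patterns.append("error_context")
--         if any(keyword in line for keyword in ['def ', 'class ', 'import ']):
--             patterns.append("code_context")
--         if any(keyword in line for keyword in ['todo', 'fix', 'bug']):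
--             patterns.append("task_context")
--
--     return list(set(patterns))
-- ===== SOURCE B (Python) =====
-- _KEYWORD_TAGS = [
--     ('error', 'error_context'), ('exception', 'error_context'), ('traceback', 'error_context'),
--     ('def ', 'code_context'), ('class ', 'code_context'), ('import ', 'code_context'),
--     ('todo', 'task_context'), ('fix', 'task_context'), ('bug', 'task_context'),
-- ]
--
-- def extract_context_patterns(content: str):
--     # One flat substring test per keyword against the first-20-lines text as a whole:
--     # no keyword contains a newline, so "kw in joined head" iff "kw in some head line".
--     head = '\n'.join(content.lower().split('\n')[:20])
--     return list({tag for kw, tag in _KEYWORD_TAGS if kw in head})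
-- ===== Notes on version B (the rewrite author's own statement) =====
-- stated objective: simpler
-- what changed: A iterates over each of the first 20 lines and, per line, runs three any()-over-keywords tests, appending duplicate tags and deduplicating at the end; B has no line loop at all: it joins the first 20 lowered lines back into one text and performs a single flat substring test per (keyword, tag) pair on that whole text (valid because no keyword contains a newline), collecting each tag at most once.
import Mathlib
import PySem

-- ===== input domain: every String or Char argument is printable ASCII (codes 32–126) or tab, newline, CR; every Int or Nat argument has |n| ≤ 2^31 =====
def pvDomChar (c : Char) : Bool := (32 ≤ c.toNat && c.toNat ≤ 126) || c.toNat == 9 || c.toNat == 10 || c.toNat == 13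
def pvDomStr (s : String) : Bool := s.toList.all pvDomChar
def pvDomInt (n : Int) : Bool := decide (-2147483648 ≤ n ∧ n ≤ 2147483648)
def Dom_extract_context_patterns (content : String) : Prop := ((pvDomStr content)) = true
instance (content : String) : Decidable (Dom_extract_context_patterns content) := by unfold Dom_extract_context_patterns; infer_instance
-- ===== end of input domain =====

-- B drops A's line-major loop entirely: it joins the first 20 lowered lines into one
-- text and runs one flat substring test per (keyword, tag) pair — correct because no
-- keyword contains a newline (objective: simpler). Both Pythons end in list(set(...)),
-- whose hash iteration order is not modelled; both ports present the resulting set in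
-- the fixed tag order (pvSetList) — outputs are compared as sets.

-- list(set(xs)): Python's hash order is not modelled; the set is presented in fixed tag order
def pvSetList (s : PySem.Set String) : List String :=
  (["error_context", "code_context", "task_context"]).filter (fun t => s.contains t)

-- ===== PORT A =====
-- keyword lists of A's three any(...) tests
def pvKwErr : List (List Char) := ["error".toList, "exception".toList, "traceback".toList]
def pvKwCode : List (List Char) := ["def ".toList, "class ".toList, "import ".toList]
def pvKwTask : List (List Char) := ["todo".toList, "fix".toList, "bug".toList]

-- any(keyword in line for keyword in kws)
def pvHasAny (kws : List (List Char)) (line : List Char) : Bool :=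
  kws.any (fun kw => PySem.Chars.isIn kw line)

-- one iteration of A's line-major loop: three conditional appends
def pvStepA (acc : List String) (line : List Char) : List String :=
  let acc1 := if pvHasAny pvKwErr line then acc ++ ["error_context"] else acc
  let acc2 := if pvHasAny pvKwCode line then acc1 ++ ["code_context"] else acc1
  if pvHasAny pvKwTask line then acc2 ++ ["task_context"] else acc2

def extract_context_patterns (content : String) : List String :=
  let lines := PySem.Chars.splitOn (PySem.Chars.lower content.toList) ['\n']
  let patterns := (PySem.List.slice lines none (some (20 : Int))).foldl pvStepA []
  pvSetList (PySem.Set.ofList patterns)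

-- ===== PORT B =====
-- the flat (keyword, tag) pairs of Source B's _KEYWORD_TAGS
def pvKwTagPairs : List (List Char × String) :=
  [("error".toList, "error_context"), ("exception".toList, "error_context"),
   ("traceback".toList, "error_context"),
   ("def ".toList, "code_context"), ("class ".toList, "code_context"),
   ("import ".toList, "code_context"),
   ("todo".toList, "task_context"), ("fix".toList, "task_context"),
   ("bug".toList, "task_context")]

def extract_context_patterns_alt (content : String) : List String :=
  -- head = '\n'.join(content.lower().split('\n')[:20])
  let head := PySem.Chars.join ['\n']
    (PySem.List.slice (PySem.Chars.splitOn (PySem.Chars.lower content.toList) ['\n'])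
      none (some (20 : Int)))
  -- {tag for kw, tag in _KEYWORD_TAGS if kw in head}
  pvSetList (PySem.Set.ofList
    ((pvKwTagPairs.filter (fun p => PySem.Chars.isIn p.1 head)).map Prod.snd))

-- ===== PRECONDITION & SPEC =====
def Spec_extract_context_patterns (content : String) (out : List String) : Prop := out = extract_context_patterns_alt content
instance (content : String) (out : List String) : Decidable (Spec_extract_context_patterns content out) := by unfold Spec_extract_context_patterns; infer_instance

-- ===== CLAIM (what is proved, stated in full; the proofs are below) =====
def Claim_equal_extract_context_patterns : Prop := ∀ (content : String), Dom_extract_context_patterns content → Spec_extract_context_patterns content (extract_context_patterns content)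

-- ===== LEMMAS AND PROOFS =====

-- the tags A appends for a single line
def pvLineTags (line : List Char) : List String :=
  (if pvHasAny pvKwErr line then ["error_context"] else [])
    ++ (if pvHasAny pvKwCode line then ["code_context"] else [])
    ++ (if pvHasAny pvKwTask line then ["task_context"] else [])

theorem pv_stepA_eq (acc : List String) (line : List Char) :
    pvStepA acc line = acc ++ pvLineTags line := by
  unfold pvStepA pvLineTags
  split_ifs <;> simp

theorem pv_foldl_stepA (L : List (List Char)) (acc : List String) :
    L.foldl pvStepA acc = acc ++ L.flatMap pvLineTags := by
  have h1 : L.foldl pvStepA acc = L.foldl (fun (a : List String) l => a ++ pvLineTags l) acc :=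
    PySem.List.foldl_congr_mem L pvStepA (fun a l => a ++ pvLineTags l) acc
      (fun a l _ => pv_stepA_eq a l)
  rw [h1]
  exact PySem.List.foldl_append_eq_flatMap pvLineTags L acc

theorem pv_mem_lineTags (line : List Char) (x : String) :
    x ∈ pvLineTags line ↔
      (pvHasAny pvKwErr line = true ∧ x = "error_context")
        ∨ (pvHasAny pvKwCode line = true ∧ x = "code_context")
        ∨ (pvHasAny pvKwTask line = true ∧ x = "task_context") := by
  unfold pvLineTags
  split_ifs <;> simp_all

-- a prefix not containing c stops before an appended 'c :: _'
theorem pv_prefix_append_cons (c : Char) (kw u v : List Char) (hc : c ∉ kw) :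
    kw <+: u ++ c :: v ↔ kw <+: u := by
  induction u generalizing kw with
  | nil =>
    cases kw with
    | nil => simp
    | cons b kw' =>
      simp only [List.nil_append, List.cons_prefix_cons]
      constructor
      · rintro ⟨rfl, -⟩; exact absurd (by simp) hc
      · intro h; simp at h
  | cons a u' ih =>
    cases kw with
    | nil => simp
    | cons b kw' =>
      simp only [List.cons_append, List.cons_prefix_cons]
      exact and_congr_right fun _ => ih kw' (fun h => hc (List.mem_cons_of_mem _ h))

-- an infix not containing c lies wholly left or wholly right of an inserted c
theorem pv_infix_append_cons (c : Char) (kw u v : List Char) (hc : c ∉ kw) :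
    kw <:+: u ++ c :: v ↔ kw <:+: u ∨ kw <:+: v := by
  induction u with
  | nil =>
    simp only [List.nil_append, List.infix_cons_iff, List.infix_nil]
    constructor
    · rintro (h | h)
      · have h' := (pv_prefix_append_cons c kw [] v hc).mp h
        exact Or.inl (List.prefix_nil.mp h')
      · exact Or.inr h
    · rintro (rfl | h)
      · exact Or.inl List.nil_prefix
      · exact Or.inr h
  | cons a u' ih =>
    simp only [List.cons_append, List.infix_cons_iff] at *
    constructor
    · rintro (h | h)
      · exact Or.inl (Or.inl ((pv_prefix_append_cons c kw (a :: u') v hc).mp (by simpa using h)))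
      · rcases ih.mp h with h' | h'
        · exact Or.inl (Or.inr h')
        · exact Or.inr h'
    · rintro ((h | h) | h)
      · exact Or.inl (by simpa using h.trans (List.prefix_append _ _))
      · exact Or.inr (ih.mpr (Or.inl h))
      · exact Or.inr (ih.mpr (Or.inr h))

-- a newline-free nonempty keyword is in the '\n'-joined lines iff it is in some line
theorem pv_isIn_join (kw : List Char) (hne : kw ≠ []) (hc : ('\n') ∉ kw)
    (lines : List (List Char)) :
    PySem.Chars.isIn kw (PySem.Chars.join ['\n'] lines)
      = lines.any (fun l => PySem.Chars.isIn kw l) := by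
  induction lines with
  | nil =>
    simp only [PySem.Chars.join_nil, List.any_nil]
    rw [Bool.eq_false_iff, Ne, PySem.Chars.isIn_iff_infix]
    simp [List.infix_nil, hne]
  | cons l ls ih =>
    cases ls with
    | nil =>
      simp [PySem.Chars.join_singleton]
    | cons l' ls' =>
      rw [PySem.Chars.join_cons_cons]
      rw [Bool.eq_iff_iff, PySem.Chars.isIn_iff_infix]
      have : l ++ ['\n'] ++ PySem.Chars.join ['\n'] (l' :: ls')
          = l ++ '\n' :: PySem.Chars.join ['\n'] (l' :: ls') := by simp
      rw [this, pv_infix_append_cons '\n' kw _ _ hc]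
      rw [← PySem.Chars.isIn_iff_infix, ← PySem.Chars.isIn_iff_infix, ih]
      simp [List.any_cons]

theorem pvSetList_congr (s t : PySem.Set String)
    (h : ∀ x, x ∈ s ↔ x ∈ t) : pvSetList s = pvSetList t := by
  unfold pvSetList
  refine List.filter_congr (fun x _ => ?_)
  rw [Bool.eq_iff_iff, PySem.Set.contains_iff, PySem.Set.contains_iff]
  exact h x

-- ===== VERDICT (by name: the statement is the Claim_ definition above) =====
set_option maxHeartbeats 1600000 in
theorem extract_context_patterns_spec : Claim_equal_extract_context_patterns := by
  intro content _
  unfold Spec_extract_context_patterns extract_context_patterns extract_context_patterns_alt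
  apply pvSetList_congr
  intro x
  set head := PySem.List.slice
    (PySem.Chars.splitOn (PySem.Chars.lower content.toList) ['\n']) none (some (20 : Int))
    with hd
  have bridge : ∀ kw : List Char, kw ≠ [] → ('\n') ∉ kw →
      (PySem.Chars.isIn kw (PySem.Chars.join ['\n'] head)
        = head.any (fun l => PySem.Chars.isIn kw l)) :=
    fun kw h1 h2 => pv_isIn_join kw h1 h2 head
  simp only [PySem.Set.mem_ofList, pv_foldl_stepA, List.nil_append, List.mem_flatMap,
    pv_mem_lineTags, List.mem_map, List.mem_filter, pvKwTagPairs,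
    List.mem_cons, List.not_mem_nil, or_false]
  constructor
  · rintro ⟨l, hl, ⟨h, rfl⟩ | ⟨h, rfl⟩ | ⟨h, rfl⟩⟩ <;>
      simp only [pvHasAny, pvKwErr, pvKwCode, pvKwTask, List.any_cons, List.any_nil,
        Bool.or_eq_true, Bool.or_false] at h
    · rcases h with h | h | h
      · exact ⟨("error".toList, "error_context"), ⟨Or.inl rfl, by
          rw [bridge _ (by decide) (by decide)]
          exact List.any_eq_true.mpr ⟨l, hl, h⟩⟩, rfl⟩
      · exact ⟨("exception".toList, "error_context"), ⟨Or.inr (Or.inl rfl), by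
          rw [bridge _ (by decide) (by decide)]
          exact List.any_eq_true.mpr ⟨l, hl, h⟩⟩, rfl⟩
      · exact ⟨("traceback".toList, "error_context"), ⟨Or.inr (Or.inr (Or.inl rfl)), by
          rw [bridge _ (by decide) (by decide)]
          exact List.any_eq_true.mpr ⟨l, hl, h⟩⟩, rfl⟩
    · rcases h with h | h | h
      · exact ⟨("def ".toList, "code_context"), ⟨Or.inr (Or.inr (Or.inr (Or.inl rfl))), by
          rw [bridge _ (by decide) (by decide)]
          exact List.any_eq_true.mpr ⟨l, hl, h⟩⟩, rfl⟩
      · exact ⟨("class ".toList, "code_context"), ⟨Or.inr (Or.inr (Or.inr (Or.inr (Or.inl rfl)))), by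
          rw [bridge _ (by decide) (by decide)]
          exact List.any_eq_true.mpr ⟨l, hl, h⟩⟩, rfl⟩
      · exact ⟨("import ".toList, "code_context"), ⟨Or.inr (Or.inr (Or.inr (Or.inr (Or.inr (Or.inl rfl))))), by
          rw [bridge _ (by decide) (by decide)]
          exact List.any_eq_true.mpr ⟨l, hl, h⟩⟩, rfl⟩
    · rcases h with h | h | h
      · exact ⟨("todo".toList, "task_context"), ⟨Or.inr (Or.inr (Or.inr (Or.inr (Or.inr (Or.inr (Or.inl rfl)))))), by
          rw [bridge _ (by decide) (by decide)]
          exact List.any_eq_true.mpr ⟨l, hl, h⟩⟩, rfl⟩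
      · exact ⟨("fix".toList, "task_context"), ⟨Or.inr (Or.inr (Or.inr (Or.inr (Or.inr (Or.inr (Or.inr (Or.inl rfl))))))), by
          rw [bridge _ (by decide) (by decide)]
          exact List.any_eq_true.mpr ⟨l, hl, h⟩⟩, rfl⟩
      · exact ⟨("bug".toList, "task_context"), ⟨Or.inr (Or.inr (Or.inr (Or.inr (Or.inr (Or.inr (Or.inr (Or.inr (rfl)))))))), by
          rw [bridge _ (by decide) (by decide)]
          exact List.any_eq_true.mpr ⟨l, hl, h⟩⟩, rfl⟩
  · rintro ⟨p, ⟨hp, hin⟩, rfl⟩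
    rcases hp with rfl | rfl | rfl | rfl | rfl | rfl | rfl | rfl | rfl
    · rw [bridge ("error".toList) (by decide) (by decide)] at hin
      obtain ⟨l, hl, h⟩ := List.any_eq_true.mp hin
      refine ⟨l, hl, ?_⟩
      simp only [pvHasAny, pvKwErr, pvKwCode, pvKwTask, List.any_cons, List.any_nil,
        Bool.or_eq_true, Bool.or_false]
      exact Or.inl ⟨Or.inl h, trivial⟩
    · rw [bridge ("exception".toList) (by decide) (by decide)] at hin
      obtain ⟨l, hl, h⟩ := List.any_eq_true.mp hin
      refine ⟨l, hl, ?_⟩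
      simp only [pvHasAny, pvKwErr, pvKwCode, pvKwTask, List.any_cons, List.any_nil,
        Bool.or_eq_true, Bool.or_false]
      exact Or.inl ⟨Or.inr (Or.inl h), trivial⟩
    · rw [bridge ("traceback".toList) (by decide) (by decide)] at hin
      obtain ⟨l, hl, h⟩ := List.any_eq_true.mp hin
      refine ⟨l, hl, ?_⟩
      simp only [pvHasAny, pvKwErr, pvKwCode, pvKwTask, List.any_cons, List.any_nil,
        Bool.or_eq_true, Bool.or_false]
      exact Or.inl ⟨Or.inr (Or.inr h), trivial⟩
    · rw [bridge ("def ".toList) (by decide) (by decide)] at hin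
      obtain ⟨l, hl, h⟩ := List.any_eq_true.mp hin
      refine ⟨l, hl, ?_⟩
      simp only [pvHasAny, pvKwErr, pvKwCode, pvKwTask, List.any_cons, List.any_nil,
        Bool.or_eq_true, Bool.or_false]
      exact Or.inr (Or.inl ⟨Or.inl h, trivial⟩)
    · rw [bridge ("class ".toList) (by decide) (by decide)] at hin
      obtain ⟨l, hl, h⟩ := List.any_eq_true.mp hin
      refine ⟨l, hl, ?_⟩
      simp only [pvHasAny, pvKwErr, pvKwCode, pvKwTask, List.any_cons, List.any_nil,
        Bool.or_eq_true, Bool.or_false]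
      exact Or.inr (Or.inl ⟨Or.inr (Or.inl h), trivial⟩)
    · rw [bridge ("import ".toList) (by decide) (by decide)] at hin
      obtain ⟨l, hl, h⟩ := List.any_eq_true.mp hin
      refine ⟨l, hl, ?_⟩
      simp only [pvHasAny, pvKwErr, pvKwCode, pvKwTask, List.any_cons, List.any_nil,
        Bool.or_eq_true, Bool.or_false]
      exact Or.inr (Or.inl ⟨Or.inr (Or.inr h), trivial⟩)
    · rw [bridge ("todo".toList) (by decide) (by decide)] at hin
      obtain ⟨l, hl, h⟩ := List.any_eq_true.mp hin
      refine ⟨l, hl, ?_⟩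
      simp only [pvHasAny, pvKwErr, pvKwCode, pvKwTask, List.any_cons, List.any_nil,
        Bool.or_eq_true, Bool.or_false]
      exact Or.inr (Or.inr ⟨Or.inl h, trivial⟩)
    · rw [bridge ("fix".toList) (by decide) (by decide)] at hin
      obtain ⟨l, hl, h⟩ := List.any_eq_true.mp hin
      refine ⟨l, hl, ?_⟩
      simp only [pvHasAny, pvKwErr, pvKwCode, pvKwTask, List.any_cons, List.any_nil,
        Bool.or_eq_true, Bool.or_false]
      exact Or.inr (Or.inr ⟨Or.inr (Or.inl h), trivial⟩)
    · rw [bridge ("bug".toList) (by decide) (by decide)] at hin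
      obtain ⟨l, hl, h⟩ := List.any_eq_true.mp hin
      refine ⟨l, hl, ?_⟩
      simp only [pvHasAny, pvKwErr, pvKwCode, pvKwTask, List.any_cons, List.any_nil,
        Bool.or_eq_true, Bool.or_false]
      exact Or.inr (Or.inr ⟨Or.inr (Or.inr h), trivial⟩)
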